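-- pv_equiv track=rewrite | github.com/rcmiller01/projectAlpha | backend/ai_reformulator.py | _make_technical_friendly
-- ===== SOURCE A (Python) =====
-- def _make_technical_friendly(content: str) -> str:
--     """Make technical responses more friendly and approachable"""
--     # Replace technical jargon with friendly explanations
--     friendly_replacements = {
--         "Error:": "Oops, looks like there's a small issue:",
--         "Failed": "Didn't work quite as expected",
--         "Incorrect": "Not quite right",
--         "You must": "You might want to",
--         "Required": "You'll need to"
--     }
--
--     for technical, friendly in friendly_replacements.items():
--         content = content.replace(technical, friendly)
--
--     return content
-- ===== SOURCE B (Python) =====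
-- _REPLACEMENTS = [
--     ("Error:", "Oops, looks like there's a small issue:"),
--     ("Failed", "Didn't work quite as expected"),
--     ("Incorrect", "Not quite right"),
--     ("You must", "You might want to"),
--     ("Required", "You'll need to"),
-- ]
--
--
-- def _make_technical_friendly(content: str) -> str:
--     """Make technical responses more friendly and approachable.
--
--     Single left-to-right scan: at each position try the jargon phrases in
--     order; on a match emit the friendly phrase and skip it, otherwise copy
--     one character.  (The phrases never overlap and no friendly phrase can
--     create a new match, so this equals the five sequential replace passes.)
--     """
--     out = []
--     i = 0
--     n = len(content)
--     while i < n: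
--         for technical, friendly in _REPLACEMENTS:
--             if content.startswith(technical, i):
--                 out.append(friendly)
--                 i += len(technical)
--                 break
--         else:
--             out.append(content[i])
--             i += 1
--     return "".join(out)
-- ===== Notes on version B (the rewrite author's own statement) =====
-- stated objective: alternative
-- what changed: Replaced five sequential full-string str.replace passes with a single left-to-right scan that dispatches on whichever jargon phrase matches at the current position (the phrases never overlap and no friendly phrase re-creates a match, so one pass equals the sequential passes); it trades CPython's C-speed str.replace for one pure-Python pass.
import Mathlib
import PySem

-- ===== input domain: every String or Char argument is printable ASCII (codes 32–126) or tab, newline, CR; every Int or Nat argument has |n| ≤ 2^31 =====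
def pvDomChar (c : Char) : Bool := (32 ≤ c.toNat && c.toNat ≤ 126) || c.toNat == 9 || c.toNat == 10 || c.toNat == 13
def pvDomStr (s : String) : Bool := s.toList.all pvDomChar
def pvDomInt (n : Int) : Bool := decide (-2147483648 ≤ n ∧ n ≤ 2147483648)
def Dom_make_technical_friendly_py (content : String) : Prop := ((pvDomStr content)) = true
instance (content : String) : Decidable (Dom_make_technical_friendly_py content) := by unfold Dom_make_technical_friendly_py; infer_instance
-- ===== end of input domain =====

-- B replaces A's five sequential full-string replace passes by one left-to-right scan
-- dispatching on whichever jargon phrase matches at the current position (objective: alternative single-pass algorithm).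

set_option maxRecDepth 4096

-- ===== PORT A =====
-- A's dict literal, in insertion order
def pvFriendlyReplacements : PySem.Dict String String := PySem.Dict.mk
  [("Error:", "Oops, looks like there's a small issue:"),
   ("Failed", "Didn't work quite as expected"),
   ("Incorrect", "Not quite right"),
   ("You must", "You might want to"),
   ("Required", "You'll need to")]

-- for technical, friendly in friendly_replacements.items(): content = content.replace(technical, friendly)
def make_technical_friendly_py (content : String) : String :=
  pvFriendlyReplacements.items.foldl
    (fun content kv => PySem.Str.replace content kv.1 kv.2) content

-- ===== PORT B =====
-- B's replacement table, as (technical, friendly) char lists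
def pvK1 : List Char := "Error:".toList
def pvV1 : List Char := "Oops, looks like there's a small issue:".toList
def pvK2 : List Char := "Failed".toList
def pvV2 : List Char := "Didn't work quite as expected".toList
def pvK3 : List Char := "Incorrect".toList
def pvV3 : List Char := "Not quite right".toList
def pvK4 : List Char := "You must".toList
def pvV4 : List Char := "You might want to".toList
def pvK5 : List Char := "Required".toList
def pvV5 : List Char := "You'll need to".toList

-- B's while loop over the remaining suffix: try the five phrases in order
-- (content.startswith(technical, i)), emit the friendly phrase and skip on a match,
-- else copy one character.
def pvScan : List Char → List Char
  | [] => []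
  | c :: t =>
    if pvK1.isPrefixOf (c :: t) then pvV1 ++ pvScan ((c :: t).drop pvK1.length)
    else if pvK2.isPrefixOf (c :: t) then pvV2 ++ pvScan ((c :: t).drop pvK2.length)
    else if pvK3.isPrefixOf (c :: t) then pvV3 ++ pvScan ((c :: t).drop pvK3.length)
    else if pvK4.isPrefixOf (c :: t) then pvV4 ++ pvScan ((c :: t).drop pvK4.length)
    else if pvK5.isPrefixOf (c :: t) then pvV5 ++ pvScan ((c :: t).drop pvK5.length)
    else c :: pvScan t
termination_by l => l.length
decreasing_by
  · have h : 0 < pvK1.length := by decide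
    simp only [List.length_drop, List.length_cons]; omega
  · have h : 0 < pvK2.length := by decide
    simp only [List.length_drop, List.length_cons]; omega
  · have h : 0 < pvK3.length := by decide
    simp only [List.length_drop, List.length_cons]; omega
  · have h : 0 < pvK4.length := by decide
    simp only [List.length_drop, List.length_cons]; omega
  · have h : 0 < pvK5.length := by decide
    simp only [List.length_drop, List.length_cons]; omega
  · simp only [List.length_cons]; omega

-- return "".join(out)
def make_technical_friendly_py_alt (content : String) : String :=
  String.ofList (pvScan content.toList)

-- ===== PRECONDITION & SPEC =====
def Spec_make_technical_friendly_py (content : String) (out : String) : Prop := out = make_technical_friendly_py_alt content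
instance (content : String) (out : String) : Decidable (Spec_make_technical_friendly_py content out) := by unfold Spec_make_technical_friendly_py; infer_instance

-- ===== CLAIM (what is proved, stated in full; the proofs are below) =====
def Claim_equal_make_technical_friendly_py : Prop := ∀ (content : String), Dom_make_technical_friendly_py content → Spec_make_technical_friendly_py content (make_technical_friendly_py content)

-- ===== LEMMAS AND PROOFS =====

-- Structural (fuel-free) reformulation of Python's str.replace for a nonempty pattern.
def pvRepL (old new : List Char) : List Char → List Char
  | [] => []
  | c :: t =>
    if h : old.isPrefixOf (c :: t) ∧ old ≠ [] then new ++ pvRepL old new ((c :: t).drop old.length)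
    else c :: pvRepL old new t
termination_by l => l.length
decreasing_by
  · have h1 : 0 < old.length := List.length_pos_of_ne_nil h.2
    simp only [List.length_drop, List.length_cons]; omega
  · simp only [List.length_cons]; omega

theorem pvRepL_nil (old new : List Char) : pvRepL old new [] = [] := by
  simp [pvRepL]

theorem pvRepL_pos (old new : List Char) (c : Char) (t : List Char)
    (h : old.isPrefixOf (c :: t)) (hne : old ≠ []) :
    pvRepL old new (c :: t) = new ++ pvRepL old new ((c :: t).drop old.length) := by
  rw [pvRepL]; simp [h, hne]

theorem pvRepL_neg (old new : List Char) (c : Char) (t : List Char)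
    (h : ¬ old.isPrefixOf (c :: t)) :
    pvRepL old new (c :: t) = c :: pvRepL old new t := by
  rw [pvRepL]; simp [h]

theorem pvGo_eq (old new : List Char) (hne : old ≠ []) :
    ∀ (fuel : Nat) (l acc : List Char), l.length ≤ fuel →
      PySem.Chars.replace.go old new fuel l acc = acc.reverse ++ pvRepL old new l := by
  intro fuel
  induction fuel with
  | zero =>
    intro l acc hl
    have : l = [] := by cases l with
      | nil => rfl
      | cons c t => simp at hl
    subst this
    rw [PySem.Chars.replace.go.eq_def]
    simp [pvRepL_nil]
  | succ n ih =>
    intro l acc hl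
    cases l with
    | nil =>
      rw [PySem.Chars.replace.go.eq_def]
      simp [pvRepL_nil]
    | cons c t =>
      rw [PySem.Chars.replace.go.eq_def]
      by_cases hp : old.isPrefixOf (c :: t)
      · simp only [hp, if_true]
        rw [ih ((c :: t).drop old.length) (new.reverse ++ acc)
            (by have h1 : 0 < old.length := List.length_pos_of_ne_nil hne
                simp only [List.length_drop, List.length_cons]
                simp only [List.length_cons] at hl; omega)]
        rw [pvRepL_pos old new c t hp hne]
        simp
      · simp only [hp, if_false]
        rw [ih t (c :: acc) (by simp only [List.length_cons] at hl; omega)]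
        rw [pvRepL_neg old new c t hp]
        simp

theorem pvReplace_eq (l old new : List Char) (hne : old ≠ []) :
    PySem.Chars.replace l old new = pvRepL old new l := by
  unfold PySem.Chars.replace
  have : old.isEmpty = false := by simp [List.isEmpty_iff, hne]
  rw [this]
  simp only [Bool.false_eq_true, if_false]
  rw [pvGo_eq old new hne l.length l [] le_rfl]
  simp

-- replace passes over a block none of whose characters can start the pattern
theorem pvRepL_append (old new pre x : List Char) (hne : old ≠ [])
    (h : ∀ c ∈ pre, old.head? ≠ some c) :
    pvRepL old new (pre ++ x) = pre ++ pvRepL old new x := by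
  induction pre with
  | nil => simp
  | cons p pre ih =>
    obtain ⟨o, os, rfl⟩ := List.exists_cons_of_ne_nil hne
    have hop : o ≠ p := by
      intro hcontra
      exact h p (List.mem_cons_self) (by simp [hcontra])
    have hp : ¬ (o :: os).isPrefixOf (p :: (pre ++ x)) := by
      simp [List.isPrefixOf, hop]
    rw [List.cons_append, pvRepL_neg _ _ _ _ hp,
        ih (fun c hc => h c (List.mem_cons_of_mem _ hc))]
    simp

-- replacing the pattern itself at the head
theorem pvRepL_self (old new x : List Char) (hne : old ≠ []) :
    pvRepL old new (old ++ x) = new ++ pvRepL old new x := by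
  obtain ⟨o, os, rfl⟩ := List.exists_cons_of_ne_nil hne
  rw [List.cons_append, pvRepL_pos _ _ _ _ (by
        rw [List.isPrefixOf_iff_prefix]
        exact ⟨x, by simp⟩) hne]
  congr 1
  rw [List.length_cons, List.drop_succ_cons, List.drop_left]

-- a block whose characters can start neither the pattern nor the replacement
-- is a prefix of the replaced string iff it was a prefix before
theorem pvPrefix_repL (old new : List Char) (hko : old ≠ []) (hvo : new ≠ []) :
    ∀ (u w : List Char), (∀ c ∈ w, old.head? ≠ some c ∧ new.head? ≠ some c) →
      w.isPrefixOf (pvRepL old new u) = w.isPrefixOf u := by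
  intro u
  induction u using pvRepL.induct (old := old) with
  | case1 => intro w hw; rw [pvRepL_nil]
  | case2 c t h ihdrop =>
    intro w hw
    rw [pvRepL_pos old new c t h.1 h.2]
    obtain ⟨o, os, rfl⟩ := List.exists_cons_of_ne_nil hko
    obtain ⟨m, ms, rfl⟩ := List.exists_cons_of_ne_nil hvo
    cases w with
    | nil => simp [List.isPrefixOf]
    | cons a w' =>
      have ha := hw a List.mem_cons_self
      have hoc : o = c := by
        have := h.1
        simp [List.isPrefixOf] at this
        exact this.1
      have ham : a ≠ m := by
        intro hcontra; exact ha.2 (by simp [hcontra])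
      have hao : a ≠ c := by
        intro hcontra; exact ha.1 (by simp [hcontra, hoc])
      have hm2 : (a == m) = false := beq_eq_false_iff_ne.mpr ham
      have hc2 : (a == c) = false := beq_eq_false_iff_ne.mpr hao
      simp [List.isPrefixOf, hm2, hc2]
  | case3 c t h iht =>
    intro w hw
    have hp : ¬ old.isPrefixOf (c :: t) := fun hc => h ⟨hc, hko⟩
    rw [pvRepL_neg old new c t hp]
    cases w with
    | nil => simp [List.isPrefixOf]
    | cons a w' =>
      simp only [List.isPrefixOf]
      rw [iht w' (fun x hx => hw x (List.mem_cons_of_mem _ hx))]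

theorem pvPrefix_repL_cons (old new u k : List Char) (c : Char)
    (hko : old ≠ []) (hvo : new ≠ [])
    (hk : ∀ x ∈ k.drop 1, old.head? ≠ some x ∧ new.head? ≠ some x) :
    k.isPrefixOf (c :: pvRepL old new u) = k.isPrefixOf (c :: u) := by
  cases k with
  | nil => simp [List.isPrefixOf]
  | cons a k' =>
    simp only [List.isPrefixOf]
    rw [pvPrefix_repL old new hko hvo u k' (by simpa using hk)]

-- A's five sequential passes, on the char-list side
def pvChainA (l : List Char) : List Char :=
  pvRepL pvK5 pvV5 (pvRepL pvK4 pvV4 (pvRepL pvK3 pvV3 (pvRepL pvK2 pvV2 (pvRepL pvK1 pvV1 l))))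

theorem pvChain_eq (l : List Char) : pvChainA l = pvScan l := by
  induction l using pvScan.induct with
  | case1 => simp [pvChainA, pvRepL_nil, pvScan]
  | case2 c t h1 ih =>
    have hl : (c :: t) = pvK1 ++ (c :: t).drop pvK1.length := by
      rw [List.isPrefixOf_iff_prefix] at h1
      exact (List.prefix_iff_eq_append.mp h1).symm
    have key : ∀ x, pvChainA (pvK1 ++ x) = pvV1 ++ pvChainA x := by
      intro x
      unfold pvChainA
      rw [pvRepL_self pvK1 pvV1 _ (by first | simp [pvK1, pvK2, pvK3, pvK4, pvK5, pvV1, pvV2, pvV3, pvV4, pvV5] | (simp [pvK1, pvK2, pvK3, pvK4, pvK5, pvV1, pvV2, pvV3, pvV4, pvV5]; decide) | decide),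
          pvRepL_append pvK2 pvV2 pvV1 _ (by first | simp [pvK1, pvK2, pvK3, pvK4, pvK5, pvV1, pvV2, pvV3, pvV4, pvV5] | (simp [pvK1, pvK2, pvK3, pvK4, pvK5, pvV1, pvV2, pvV3, pvV4, pvV5]; decide) | decide) (by first | simp [pvK1, pvK2, pvK3, pvK4, pvK5, pvV1, pvV2, pvV3, pvV4, pvV5] | (simp [pvK1, pvK2, pvK3, pvK4, pvK5, pvV1, pvV2, pvV3, pvV4, pvV5]; decide) | decide),
          pvRepL_append pvK3 pvV3 pvV1 _ (by first | simp [pvK1, pvK2, pvK3, pvK4, pvK5, pvV1, pvV2, pvV3, pvV4, pvV5] | (simp [pvK1, pvK2, pvK3, pvK4, pvK5, pvV1, pvV2, pvV3, pvV4, pvV5]; decide) | decide) (by first | simp [pvK1, pvK2, pvK3, pvK4, pvK5, pvV1, pvV2, pvV3, pvV4, pvV5] | (simp [pvK1, pvK2, pvK3, pvK4, pvK5, pvV1, pvV2, pvV3, pvV4, pvV5]; decide) | decide),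
          pvRepL_append pvK4 pvV4 pvV1 _ (by first | simp [pvK1, pvK2, pvK3, pvK4, pvK5, pvV1, pvV2, pvV3, pvV4, pvV5] | (simp [pvK1, pvK2, pvK3, pvK4, pvK5, pvV1, pvV2, pvV3, pvV4, pvV5]; decide) | decide) (by first | simp [pvK1, pvK2, pvK3, pvK4, pvK5, pvV1, pvV2, pvV3, pvV4, pvV5] | (simp [pvK1, pvK2, pvK3, pvK4, pvK5, pvV1, pvV2, pvV3, pvV4, pvV5]; decide) | decide),
          pvRepL_append pvK5 pvV5 pvV1 _ (by first | simp [pvK1, pvK2, pvK3, pvK4, pvK5, pvV1, pvV2, pvV3, pvV4, pvV5] | (simp [pvK1, pvK2, pvK3, pvK4, pvK5, pvV1, pvV2, pvV3, pvV4, pvV5]; decide) | decide) (by first | simp [pvK1, pvK2, pvK3, pvK4, pvK5, pvV1, pvV2, pvV3, pvV4, pvV5] | (simp [pvK1, pvK2, pvK3, pvK4, pvK5, pvV1, pvV2, pvV3, pvV4, pvV5]; decide) | decide)]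
    calc pvChainA (c :: t) = pvV1 ++ pvChainA ((c :: t).drop pvK1.length) := by
          rw [hl]; exact key _
      _ = pvV1 ++ pvScan ((c :: t).drop pvK1.length) := by rw [ih]
      _ = pvScan (c :: t) := by rw [pvScan]; simp [h1]
  | case3 c t h1 h2 ih =>
    have hl : (c :: t) = pvK2 ++ (c :: t).drop pvK2.length := by
      rw [List.isPrefixOf_iff_prefix] at h2
      exact (List.prefix_iff_eq_append.mp h2).symm
    have key : ∀ x, pvChainA (pvK2 ++ x) = pvV2 ++ pvChainA x := by
      intro x
      unfold pvChainA
      rw [pvRepL_append pvK1 pvV1 pvK2 _ (by first | simp [pvK1, pvK2, pvK3, pvK4, pvK5, pvV1, pvV2, pvV3, pvV4, pvV5] | (simp [pvK1, pvK2, pvK3, pvK4, pvK5, pvV1, pvV2, pvV3, pvV4, pvV5]; decide) | decide) (by first | simp [pvK1, pvK2, pvK3, pvK4, pvK5, pvV1, pvV2, pvV3, pvV4, pvV5] | (simp [pvK1, pvK2, pvK3, pvK4, pvK5, pvV1, pvV2, pvV3, pvV4, pvV5]; decide) | decide),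
          pvRepL_self pvK2 pvV2 _ (by first | simp [pvK1, pvK2, pvK3, pvK4, pvK5, pvV1, pvV2, pvV3, pvV4, pvV5] | (simp [pvK1, pvK2, pvK3, pvK4, pvK5, pvV1, pvV2, pvV3, pvV4, pvV5]; decide) | decide),
          pvRepL_append pvK3 pvV3 pvV2 _ (by first | simp [pvK1, pvK2, pvK3, pvK4, pvK5, pvV1, pvV2, pvV3, pvV4, pvV5] | (simp [pvK1, pvK2, pvK3, pvK4, pvK5, pvV1, pvV2, pvV3, pvV4, pvV5]; decide) | decide) (by first | simp [pvK1, pvK2, pvK3, pvK4, pvK5, pvV1, pvV2, pvV3, pvV4, pvV5] | (simp [pvK1, pvK2, pvK3, pvK4, pvK5, pvV1, pvV2, pvV3, pvV4, pvV5]; decide) | decide),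
          pvRepL_append pvK4 pvV4 pvV2 _ (by first | simp [pvK1, pvK2, pvK3, pvK4, pvK5, pvV1, pvV2, pvV3, pvV4, pvV5] | (simp [pvK1, pvK2, pvK3, pvK4, pvK5, pvV1, pvV2, pvV3, pvV4, pvV5]; decide) | decide) (by first | simp [pvK1, pvK2, pvK3, pvK4, pvK5, pvV1, pvV2, pvV3, pvV4, pvV5] | (simp [pvK1, pvK2, pvK3, pvK4, pvK5, pvV1, pvV2, pvV3, pvV4, pvV5]; decide) | decide),
          pvRepL_append pvK5 pvV5 pvV2 _ (by first | simp [pvK1, pvK2, pvK3, pvK4, pvK5, pvV1, pvV2, pvV3, pvV4, pvV5] | (simp [pvK1, pvK2, pvK3, pvK4, pvK5, pvV1, pvV2, pvV3, pvV4, pvV5]; decide) | decide) (by first | simp [pvK1, pvK2, pvK3, pvK4, pvK5, pvV1, pvV2, pvV3, pvV4, pvV5] | (simp [pvK1, pvK2, pvK3, pvK4, pvK5, pvV1, pvV2, pvV3, pvV4, pvV5]; decide) | decide)]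
    calc pvChainA (c :: t) = pvV2 ++ pvChainA ((c :: t).drop pvK2.length) := by
          rw [hl]; exact key _
      _ = pvV2 ++ pvScan ((c :: t).drop pvK2.length) := by rw [ih]
      _ = pvScan (c :: t) := by rw [pvScan]; simp [h1, h2]
  | case4 c t h1 h2 h3 ih =>
    have hl : (c :: t) = pvK3 ++ (c :: t).drop pvK3.length := by
      rw [List.isPrefixOf_iff_prefix] at h3
      exact (List.prefix_iff_eq_append.mp h3).symm
    have key : ∀ x, pvChainA (pvK3 ++ x) = pvV3 ++ pvChainA x := by
      intro x
      unfold pvChainA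
      rw [pvRepL_append pvK1 pvV1 pvK3 _ (by first | simp [pvK1, pvK2, pvK3, pvK4, pvK5, pvV1, pvV2, pvV3, pvV4, pvV5] | (simp [pvK1, pvK2, pvK3, pvK4, pvK5, pvV1, pvV2, pvV3, pvV4, pvV5]; decide) | decide) (by first | simp [pvK1, pvK2, pvK3, pvK4, pvK5, pvV1, pvV2, pvV3, pvV4, pvV5] | (simp [pvK1, pvK2, pvK3, pvK4, pvK5, pvV1, pvV2, pvV3, pvV4, pvV5]; decide) | decide),
          pvRepL_append pvK2 pvV2 pvK3 _ (by first | simp [pvK1, pvK2, pvK3, pvK4, pvK5, pvV1, pvV2, pvV3, pvV4, pvV5] | (simp [pvK1, pvK2, pvK3, pvK4, pvK5, pvV1, pvV2, pvV3, pvV4, pvV5]; decide) | decide) (by first | simp [pvK1, pvK2, pvK3, pvK4, pvK5, pvV1, pvV2, pvV3, pvV4, pvV5] | (simp [pvK1, pvK2, pvK3, pvK4, pvK5, pvV1, pvV2, pvV3, pvV4, pvV5]; decide) | decide),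
          pvRepL_self pvK3 pvV3 _ (by first | simp [pvK1, pvK2, pvK3, pvK4, pvK5, pvV1, pvV2, pvV3, pvV4, pvV5] | (simp [pvK1, pvK2, pvK3, pvK4, pvK5, pvV1, pvV2, pvV3, pvV4, pvV5]; decide) | decide),
          pvRepL_append pvK4 pvV4 pvV3 _ (by first | simp [pvK1, pvK2, pvK3, pvK4, pvK5, pvV1, pvV2, pvV3, pvV4, pvV5] | (simp [pvK1, pvK2, pvK3, pvK4, pvK5, pvV1, pvV2, pvV3, pvV4, pvV5]; decide) | decide) (by first | simp [pvK1, pvK2, pvK3, pvK4, pvK5, pvV1, pvV2, pvV3, pvV4, pvV5] | (simp [pvK1, pvK2, pvK3, pvK4, pvK5, pvV1, pvV2, pvV3, pvV4, pvV5]; decide) | decide),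
          pvRepL_append pvK5 pvV5 pvV3 _ (by first | simp [pvK1, pvK2, pvK3, pvK4, pvK5, pvV1, pvV2, pvV3, pvV4, pvV5] | (simp [pvK1, pvK2, pvK3, pvK4, pvK5, pvV1, pvV2, pvV3, pvV4, pvV5]; decide) | decide) (by first | simp [pvK1, pvK2, pvK3, pvK4, pvK5, pvV1, pvV2, pvV3, pvV4, pvV5] | (simp [pvK1, pvK2, pvK3, pvK4, pvK5, pvV1, pvV2, pvV3, pvV4, pvV5]; decide) | decide)]
    calc pvChainA (c :: t) = pvV3 ++ pvChainA ((c :: t).drop pvK3.length) := by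
          rw [hl]; exact key _
      _ = pvV3 ++ pvScan ((c :: t).drop pvK3.length) := by rw [ih]
      _ = pvScan (c :: t) := by rw [pvScan]; simp [h1, h2, h3]
  | case5 c t h1 h2 h3 h4 ih =>
    have hl : (c :: t) = pvK4 ++ (c :: t).drop pvK4.length := by
      rw [List.isPrefixOf_iff_prefix] at h4
      exact (List.prefix_iff_eq_append.mp h4).symm
    have key : ∀ x, pvChainA (pvK4 ++ x) = pvV4 ++ pvChainA x := by
      intro x
      unfold pvChainA
      rw [pvRepL_append pvK1 pvV1 pvK4 _ (by first | simp [pvK1, pvK2, pvK3, pvK4, pvK5, pvV1, pvV2, pvV3, pvV4, pvV5] | (simp [pvK1, pvK2, pvK3, pvK4, pvK5, pvV1, pvV2, pvV3, pvV4, pvV5]; decide) | decide) (by first | simp [pvK1, pvK2, pvK3, pvK4, pvK5, pvV1, pvV2, pvV3, pvV4, pvV5] | (simp [pvK1, pvK2, pvK3, pvK4, pvK5, pvV1, pvV2, pvV3, pvV4, pvV5]; decide) | decide),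
          pvRepL_append pvK2 pvV2 pvK4 _ (by first | simp [pvK1, pvK2, pvK3, pvK4, pvK5, pvV1, pvV2, pvV3, pvV4, pvV5] | (simp [pvK1, pvK2, pvK3, pvK4, pvK5, pvV1, pvV2, pvV3, pvV4, pvV5]; decide) | decide) (by first | simp [pvK1, pvK2, pvK3, pvK4, pvK5, pvV1, pvV2, pvV3, pvV4, pvV5] | (simp [pvK1, pvK2, pvK3, pvK4, pvK5, pvV1, pvV2, pvV3, pvV4, pvV5]; decide) | decide),
          pvRepL_append pvK3 pvV3 pvK4 _ (by first | simp [pvK1, pvK2, pvK3, pvK4, pvK5, pvV1, pvV2, pvV3, pvV4, pvV5] | (simp [pvK1, pvK2, pvK3, pvK4, pvK5, pvV1, pvV2, pvV3, pvV4, pvV5]; decide) | decide) (by first | simp [pvK1, pvK2, pvK3, pvK4, pvK5, pvV1, pvV2, pvV3, pvV4, pvV5] | (simp [pvK1, pvK2, pvK3, pvK4, pvK5, pvV1, pvV2, pvV3, pvV4, pvV5]; decide) | decide),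
          pvRepL_self pvK4 pvV4 _ (by first | simp [pvK1, pvK2, pvK3, pvK4, pvK5, pvV1, pvV2, pvV3, pvV4, pvV5] | (simp [pvK1, pvK2, pvK3, pvK4, pvK5, pvV1, pvV2, pvV3, pvV4, pvV5]; decide) | decide),
          pvRepL_append pvK5 pvV5 pvV4 _ (by first | simp [pvK1, pvK2, pvK3, pvK4, pvK5, pvV1, pvV2, pvV3, pvV4, pvV5] | (simp [pvK1, pvK2, pvK3, pvK4, pvK5, pvV1, pvV2, pvV3, pvV4, pvV5]; decide) | decide) (by first | simp [pvK1, pvK2, pvK3, pvK4, pvK5, pvV1, pvV2, pvV3, pvV4, pvV5] | (simp [pvK1, pvK2, pvK3, pvK4, pvK5, pvV1, pvV2, pvV3, pvV4, pvV5]; decide) | decide)]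
    calc pvChainA (c :: t) = pvV4 ++ pvChainA ((c :: t).drop pvK4.length) := by
          rw [hl]; exact key _
      _ = pvV4 ++ pvScan ((c :: t).drop pvK4.length) := by rw [ih]
      _ = pvScan (c :: t) := by rw [pvScan]; simp [h1, h2, h3, h4]
  | case6 c t h1 h2 h3 h4 h5 ih =>
    have hl : (c :: t) = pvK5 ++ (c :: t).drop pvK5.length := by
      rw [List.isPrefixOf_iff_prefix] at h5
      exact (List.prefix_iff_eq_append.mp h5).symm
    have key : ∀ x, pvChainA (pvK5 ++ x) = pvV5 ++ pvChainA x := by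
      intro x
      unfold pvChainA
      rw [pvRepL_append pvK1 pvV1 pvK5 _ (by first | simp [pvK1, pvK2, pvK3, pvK4, pvK5, pvV1, pvV2, pvV3, pvV4, pvV5] | (simp [pvK1, pvK2, pvK3, pvK4, pvK5, pvV1, pvV2, pvV3, pvV4, pvV5]; decide) | decide) (by first | simp [pvK1, pvK2, pvK3, pvK4, pvK5, pvV1, pvV2, pvV3, pvV4, pvV5] | (simp [pvK1, pvK2, pvK3, pvK4, pvK5, pvV1, pvV2, pvV3, pvV4, pvV5]; decide) | decide),
          pvRepL_append pvK2 pvV2 pvK5 _ (by first | simp [pvK1, pvK2, pvK3, pvK4, pvK5, pvV1, pvV2, pvV3, pvV4, pvV5] | (simp [pvK1, pvK2, pvK3, pvK4, pvK5, pvV1, pvV2, pvV3, pvV4, pvV5]; decide) | decide) (by first | simp [pvK1, pvK2, pvK3, pvK4, pvK5, pvV1, pvV2, pvV3, pvV4, pvV5] | (simp [pvK1, pvK2, pvK3, pvK4, pvK5, pvV1, pvV2, pvV3, pvV4, pvV5]; decide) | decide),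
          pvRepL_append pvK3 pvV3 pvK5 _ (by first | simp [pvK1, pvK2, pvK3, pvK4, pvK5, pvV1, pvV2, pvV3, pvV4, pvV5] | (simp [pvK1, pvK2, pvK3, pvK4, pvK5, pvV1, pvV2, pvV3, pvV4, pvV5]; decide) | decide) (by first | simp [pvK1, pvK2, pvK3, pvK4, pvK5, pvV1, pvV2, pvV3, pvV4, pvV5] | (simp [pvK1, pvK2, pvK3, pvK4, pvK5, pvV1, pvV2, pvV3, pvV4, pvV5]; decide) | decide),
          pvRepL_append pvK4 pvV4 pvK5 _ (by first | simp [pvK1, pvK2, pvK3, pvK4, pvK5, pvV1, pvV2, pvV3, pvV4, pvV5] | (simp [pvK1, pvK2, pvK3, pvK4, pvK5, pvV1, pvV2, pvV3, pvV4, pvV5]; decide) | decide) (by first | simp [pvK1, pvK2, pvK3, pvK4, pvK5, pvV1, pvV2, pvV3, pvV4, pvV5] | (simp [pvK1, pvK2, pvK3, pvK4, pvK5, pvV1, pvV2, pvV3, pvV4, pvV5]; decide) | decide),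
          pvRepL_self pvK5 pvV5 _ (by first | simp [pvK1, pvK2, pvK3, pvK4, pvK5, pvV1, pvV2, pvV3, pvV4, pvV5] | (simp [pvK1, pvK2, pvK3, pvK4, pvK5, pvV1, pvV2, pvV3, pvV4, pvV5]; decide) | decide)]
    calc pvChainA (c :: t) = pvV5 ++ pvChainA ((c :: t).drop pvK5.length) := by
          rw [hl]; exact key _
      _ = pvV5 ++ pvScan ((c :: t).drop pvK5.length) := by rw [ih]
      _ = pvScan (c :: t) := by rw [pvScan]; simp [h1, h2, h3, h4, h5]
  | case7 c t h1 h2 h3 h4 h5 ih =>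
    unfold pvChainA
    rw [pvRepL_neg pvK1 pvV1 c t h1]
    have p2 : ¬ pvK2.isPrefixOf (c :: pvRepL pvK1 pvV1 t) := by
      rw [pvPrefix_repL_cons pvK1 pvV1 t pvK2 c (by first | simp [pvK1, pvK2, pvK3, pvK4, pvK5, pvV1, pvV2, pvV3, pvV4, pvV5] | (simp [pvK1, pvK2, pvK3, pvK4, pvK5, pvV1, pvV2, pvV3, pvV4, pvV5]; decide) | decide) (by first | simp [pvK1, pvK2, pvK3, pvK4, pvK5, pvV1, pvV2, pvV3, pvV4, pvV5] | (simp [pvK1, pvK2, pvK3, pvK4, pvK5, pvV1, pvV2, pvV3, pvV4, pvV5]; decide) | decide) (by first | simp [pvK1, pvK2, pvK3, pvK4, pvK5, pvV1, pvV2, pvV3, pvV4, pvV5] | (simp [pvK1, pvK2, pvK3, pvK4, pvK5, pvV1, pvV2, pvV3, pvV4, pvV5]; decide) | decide)]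
      exact h2
    rw [pvRepL_neg pvK2 pvV2 c _ p2]
    have p3 : ¬ pvK3.isPrefixOf (c :: pvRepL pvK2 pvV2 (pvRepL pvK1 pvV1 t)) := by
      rw [pvPrefix_repL_cons pvK2 pvV2 _ pvK3 c (by first | simp [pvK1, pvK2, pvK3, pvK4, pvK5, pvV1, pvV2, pvV3, pvV4, pvV5] | (simp [pvK1, pvK2, pvK3, pvK4, pvK5, pvV1, pvV2, pvV3, pvV4, pvV5]; decide) | decide) (by first | simp [pvK1, pvK2, pvK3, pvK4, pvK5, pvV1, pvV2, pvV3, pvV4, pvV5] | (simp [pvK1, pvK2, pvK3, pvK4, pvK5, pvV1, pvV2, pvV3, pvV4, pvV5]; decide) | decide) (by first | simp [pvK1, pvK2, pvK3, pvK4, pvK5, pvV1, pvV2, pvV3, pvV4, pvV5] | (simp [pvK1, pvK2, pvK3, pvK4, pvK5, pvV1, pvV2, pvV3, pvV4, pvV5]; decide) | decide),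
          pvPrefix_repL_cons pvK1 pvV1 t pvK3 c (by first | simp [pvK1, pvK2, pvK3, pvK4, pvK5, pvV1, pvV2, pvV3, pvV4, pvV5] | (simp [pvK1, pvK2, pvK3, pvK4, pvK5, pvV1, pvV2, pvV3, pvV4, pvV5]; decide) | decide) (by first | simp [pvK1, pvK2, pvK3, pvK4, pvK5, pvV1, pvV2, pvV3, pvV4, pvV5] | (simp [pvK1, pvK2, pvK3, pvK4, pvK5, pvV1, pvV2, pvV3, pvV4, pvV5]; decide) | decide) (by first | simp [pvK1, pvK2, pvK3, pvK4, pvK5, pvV1, pvV2, pvV3, pvV4, pvV5] | (simp [pvK1, pvK2, pvK3, pvK4, pvK5, pvV1, pvV2, pvV3, pvV4, pvV5]; decide) | decide)]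
      exact h3
    rw [pvRepL_neg pvK3 pvV3 c _ p3]
    have p4 : ¬ pvK4.isPrefixOf
        (c :: pvRepL pvK3 pvV3 (pvRepL pvK2 pvV2 (pvRepL pvK1 pvV1 t))) := by
      rw [pvPrefix_repL_cons pvK3 pvV3 _ pvK4 c (by first | simp [pvK1, pvK2, pvK3, pvK4, pvK5, pvV1, pvV2, pvV3, pvV4, pvV5] | (simp [pvK1, pvK2, pvK3, pvK4, pvK5, pvV1, pvV2, pvV3, pvV4, pvV5]; decide) | decide) (by first | simp [pvK1, pvK2, pvK3, pvK4, pvK5, pvV1, pvV2, pvV3, pvV4, pvV5] | (simp [pvK1, pvK2, pvK3, pvK4, pvK5, pvV1, pvV2, pvV3, pvV4, pvV5]; decide) | decide) (by first | simp [pvK1, pvK2, pvK3, pvK4, pvK5, pvV1, pvV2, pvV3, pvV4, pvV5] | (simp [pvK1, pvK2, pvK3, pvK4, pvK5, pvV1, pvV2, pvV3, pvV4, pvV5]; decide) | decide),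
          pvPrefix_repL_cons pvK2 pvV2 _ pvK4 c (by first | simp [pvK1, pvK2, pvK3, pvK4, pvK5, pvV1, pvV2, pvV3, pvV4, pvV5] | (simp [pvK1, pvK2, pvK3, pvK4, pvK5, pvV1, pvV2, pvV3, pvV4, pvV5]; decide) | decide) (by first | simp [pvK1, pvK2, pvK3, pvK4, pvK5, pvV1, pvV2, pvV3, pvV4, pvV5] | (simp [pvK1, pvK2, pvK3, pvK4, pvK5, pvV1, pvV2, pvV3, pvV4, pvV5]; decide) | decide) (by first | simp [pvK1, pvK2, pvK3, pvK4, pvK5, pvV1, pvV2, pvV3, pvV4, pvV5] | (simp [pvK1, pvK2, pvK3, pvK4, pvK5, pvV1, pvV2, pvV3, pvV4, pvV5]; decide) | decide),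
          pvPrefix_repL_cons pvK1 pvV1 t pvK4 c (by first | simp [pvK1, pvK2, pvK3, pvK4, pvK5, pvV1, pvV2, pvV3, pvV4, pvV5] | (simp [pvK1, pvK2, pvK3, pvK4, pvK5, pvV1, pvV2, pvV3, pvV4, pvV5]; decide) | decide) (by first | simp [pvK1, pvK2, pvK3, pvK4, pvK5, pvV1, pvV2, pvV3, pvV4, pvV5] | (simp [pvK1, pvK2, pvK3, pvK4, pvK5, pvV1, pvV2, pvV3, pvV4, pvV5]; decide) | decide) (by first | simp [pvK1, pvK2, pvK3, pvK4, pvK5, pvV1, pvV2, pvV3, pvV4, pvV5] | (simp [pvK1, pvK2, pvK3, pvK4, pvK5, pvV1, pvV2, pvV3, pvV4, pvV5]; decide) | decide)]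
      exact h4
    rw [pvRepL_neg pvK4 pvV4 c _ p4]
    have p5 : ¬ pvK5.isPrefixOf
        (c :: pvRepL pvK4 pvV4 (pvRepL pvK3 pvV3 (pvRepL pvK2 pvV2 (pvRepL pvK1 pvV1 t)))) := by
      rw [pvPrefix_repL_cons pvK4 pvV4 _ pvK5 c (by first | simp [pvK1, pvK2, pvK3, pvK4, pvK5, pvV1, pvV2, pvV3, pvV4, pvV5] | (simp [pvK1, pvK2, pvK3, pvK4, pvK5, pvV1, pvV2, pvV3, pvV4, pvV5]; decide) | decide) (by first | simp [pvK1, pvK2, pvK3, pvK4, pvK5, pvV1, pvV2, pvV3, pvV4, pvV5] | (simp [pvK1, pvK2, pvK3, pvK4, pvK5, pvV1, pvV2, pvV3, pvV4, pvV5]; decide) | decide) (by first | simp [pvK1, pvK2, pvK3, pvK4, pvK5, pvV1, pvV2, pvV3, pvV4, pvV5] | (simp [pvK1, pvK2, pvK3, pvK4, pvK5, pvV1, pvV2, pvV3, pvV4, pvV5]; decide) | decide),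
          pvPrefix_repL_cons pvK3 pvV3 _ pvK5 c (by first | simp [pvK1, pvK2, pvK3, pvK4, pvK5, pvV1, pvV2, pvV3, pvV4, pvV5] | (simp [pvK1, pvK2, pvK3, pvK4, pvK5, pvV1, pvV2, pvV3, pvV4, pvV5]; decide) | decide) (by first | simp [pvK1, pvK2, pvK3, pvK4, pvK5, pvV1, pvV2, pvV3, pvV4, pvV5] | (simp [pvK1, pvK2, pvK3, pvK4, pvK5, pvV1, pvV2, pvV3, pvV4, pvV5]; decide) | decide) (by first | simp [pvK1, pvK2, pvK3, pvK4, pvK5, pvV1, pvV2, pvV3, pvV4, pvV5] | (simp [pvK1, pvK2, pvK3, pvK4, pvK5, pvV1, pvV2, pvV3, pvV4, pvV5]; decide) | decide),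
          pvPrefix_repL_cons pvK2 pvV2 _ pvK5 c (by first | simp [pvK1, pvK2, pvK3, pvK4, pvK5, pvV1, pvV2, pvV3, pvV4, pvV5] | (simp [pvK1, pvK2, pvK3, pvK4, pvK5, pvV1, pvV2, pvV3, pvV4, pvV5]; decide) | decide) (by first | simp [pvK1, pvK2, pvK3, pvK4, pvK5, pvV1, pvV2, pvV3, pvV4, pvV5] | (simp [pvK1, pvK2, pvK3, pvK4, pvK5, pvV1, pvV2, pvV3, pvV4, pvV5]; decide) | decide) (by first | simp [pvK1, pvK2, pvK3, pvK4, pvK5, pvV1, pvV2, pvV3, pvV4, pvV5] | (simp [pvK1, pvK2, pvK3, pvK4, pvK5, pvV1, pvV2, pvV3, pvV4, pvV5]; decide) | decide),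
          pvPrefix_repL_cons pvK1 pvV1 t pvK5 c (by first | simp [pvK1, pvK2, pvK3, pvK4, pvK5, pvV1, pvV2, pvV3, pvV4, pvV5] | (simp [pvK1, pvK2, pvK3, pvK4, pvK5, pvV1, pvV2, pvV3, pvV4, pvV5]; decide) | decide) (by first | simp [pvK1, pvK2, pvK3, pvK4, pvK5, pvV1, pvV2, pvV3, pvV4, pvV5] | (simp [pvK1, pvK2, pvK3, pvK4, pvK5, pvV1, pvV2, pvV3, pvV4, pvV5]; decide) | decide) (by first | simp [pvK1, pvK2, pvK3, pvK4, pvK5, pvV1, pvV2, pvV3, pvV4, pvV5] | (simp [pvK1, pvK2, pvK3, pvK4, pvK5, pvV1, pvV2, pvV3, pvV4, pvV5]; decide) | decide)]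
      exact h5
    rw [pvRepL_neg pvK5 pvV5 c _ p5]
    rw [show (pvRepL pvK5 pvV5 (pvRepL pvK4 pvV4 (pvRepL pvK3 pvV3 (pvRepL pvK2 pvV2 (pvRepL pvK1 pvV1 t))))) = pvChainA t from rfl, ih]
    rw [pvScan]
    simp [h1, h2, h3, h4, h5]

-- ===== VERDICT (by name: the statement is the Claim_ definition above) =====
theorem make_technical_friendly_py_spec : Claim_equal_make_technical_friendly_py := by
  intro content _
  unfold Spec_make_technical_friendly_py
  have hA : make_technical_friendly_py content = String.ofList (pvChainA content.toList) := by
    unfold make_technical_friendly_py pvFriendlyReplacements pvChainA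
    simp only [PySem.Dict.items, List.foldl]
    simp only [PySem.Str.replace, String.toList_ofList]
    rw [pvReplace_eq _ _ _ (by first | simp [pvK1, pvK2, pvK3, pvK4, pvK5, pvV1, pvV2, pvV3, pvV4, pvV5] | (simp [pvK1, pvK2, pvK3, pvK4, pvK5, pvV1, pvV2, pvV3, pvV4, pvV5]; decide) | decide), pvReplace_eq _ _ _ (by first | simp [pvK1, pvK2, pvK3, pvK4, pvK5, pvV1, pvV2, pvV3, pvV4, pvV5] | (simp [pvK1, pvK2, pvK3, pvK4, pvK5, pvV1, pvV2, pvV3, pvV4, pvV5]; decide) | decide),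
        pvReplace_eq _ _ _ (by first | simp [pvK1, pvK2, pvK3, pvK4, pvK5, pvV1, pvV2, pvV3, pvV4, pvV5] | (simp [pvK1, pvK2, pvK3, pvK4, pvK5, pvV1, pvV2, pvV3, pvV4, pvV5]; decide) | decide), pvReplace_eq _ _ _ (by first | simp [pvK1, pvK2, pvK3, pvK4, pvK5, pvV1, pvV2, pvV3, pvV4, pvV5] | (simp [pvK1, pvK2, pvK3, pvK4, pvK5, pvV1, pvV2, pvV3, pvV4, pvV5]; decide) | decide),
        pvReplace_eq _ _ _ (by first | simp [pvK1, pvK2, pvK3, pvK4, pvK5, pvV1, pvV2, pvV3, pvV4, pvV5] | (simp [pvK1, pvK2, pvK3, pvK4, pvK5, pvV1, pvV2, pvV3, pvV4, pvV5]; decide) | decide)]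
    rfl
  rw [hA]
  unfold make_technical_friendly_py_alt
  rw [pvChain_eq]
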